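-- pv_equiv track=rewrite | github.com/astinard/clinical-ontology-normalizer | backend/app/services/nlp.py | get_section_name
-- ===== SOURCE A (Python) =====
-- def get_section_name(text: str, offset: int) -> str | None:
--     """Try to identify the clinical section for a given offset.
--
--     Common sections include: Chief Complaint, HPI, Assessment, Plan, etc.
--
--     Args:
--         text: The full document text.
--         offset: Character offset to find section for.
--
--     Returns:
--         Section name if identified, None otherwise.
--     """
--     # Common clinical note section headers
--     section_patterns = [
--         "Chief Complaint",
--         "CC",
--         "History of Present Illness",
--         "HPI",
--         "Past Medical History",
--         "PMH",
--         "Social History",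
--         "Family History",
--         "Review of Systems",
--         "ROS",
--         "Physical Exam",
--         "PE",
--         "Assessment",
--         "Plan",
--         "Medications",
--         "Allergies",
--         "Vital Signs",
--         "Labs",
--         "Imaging",
--         "Hospital Course",
--         "Discharge Diagnosis",
--         "Admission Diagnosis",
--         "Discharge Medications",
--         "Follow-up",
--     ]
--
--     text_before = text[:offset].lower()
--
--     # Find the most recent section header
--     current_section = None
--     current_pos = -1
--
--     for pattern in section_patterns:
--         # Look for pattern followed by : or newline
--         search_pattern = pattern.lower()
--         pos = text_before.rfind(search_pattern)
--         if pos > current_pos: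
--             current_pos = pos
--             current_section = pattern
--
--     return current_section
-- ===== SOURCE B (Python) =====
-- _SECTION_NAMES = (
--     "Chief Complaint,CC,History of Present Illness,HPI,Past Medical History,"
--     "PMH,Social History,Family History,Review of Systems,ROS,Physical Exam,"
--     "PE,Assessment,Plan,Medications,Allergies,Vital Signs,Labs,Imaging,"
--     "Hospital Course,Discharge Diagnosis,Admission Diagnosis,"
--     "Discharge Medications,Follow-up"
-- ).split(",")
--
--
-- def get_section_name(text: str, offset: int) -> str | None:
--     """Backward scan with early exit: walk positions from the end of
--     text[:offset] towards 0 and return the first (earliest-listed) section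
--     name that starts at the current position; None if no position matches."""
--     tb = text[:offset].lower()
--     i = len(tb) - 1
--     while i >= 0:
--         for name in _SECTION_NAMES:
--             if tb.startswith(name.lower(), i):
--                 return name
--         i -= 1
--     return None
-- ===== Notes on version B (the rewrite author's own statement) =====
-- stated objective: alternative
-- what changed: A runs str.rfind once per pattern and keeps a running argmax over all 24 patterns; B splits a comma-joined name table once and walks positions of text[:offset] backwards, returning immediately the earliest-listed name that starts at the first (i.e. highest) matching position, which reproduces A's tie-break without any rfind or argmax state.
import Mathlib
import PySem

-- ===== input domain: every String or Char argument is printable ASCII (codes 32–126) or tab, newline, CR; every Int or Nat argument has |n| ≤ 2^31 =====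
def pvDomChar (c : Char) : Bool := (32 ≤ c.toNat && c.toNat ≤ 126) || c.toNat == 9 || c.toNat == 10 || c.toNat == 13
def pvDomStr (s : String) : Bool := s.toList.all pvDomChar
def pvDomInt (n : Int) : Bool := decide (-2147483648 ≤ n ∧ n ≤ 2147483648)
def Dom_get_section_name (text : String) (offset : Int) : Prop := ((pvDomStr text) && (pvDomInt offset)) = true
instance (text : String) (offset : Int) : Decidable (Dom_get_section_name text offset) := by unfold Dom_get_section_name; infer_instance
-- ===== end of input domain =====

set_option maxRecDepth 8192

-- B replaces A's per-pattern rfind + running-argmax fold by a backward scan with early exit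
-- over text[:offset] (first matching position from the right, earliest-listed name there),
-- with the name table stored as one comma-joined string split once: an alternative
-- decomposition, proved to return exactly A's value.

-- ===== PORT A =====
def sectionPatterns : List String :=
  ["Chief Complaint", "CC", "History of Present Illness", "HPI", "Past Medical History",
   "PMH", "Social History", "Family History", "Review of Systems", "ROS", "Physical Exam",
   "PE", "Assessment", "Plan", "Medications", "Allergies", "Vital Signs", "Labs", "Imaging",
   "Hospital Course", "Discharge Diagnosis", "Admission Diagnosis", "Discharge Medications",
   "Follow-up"]

def get_section_name (text : String) (offset : Int) : Option String :=
  let text_before := PySem.Str.lower (PySem.Str.slice text none (some offset))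
  (sectionPatterns.foldl
    (fun (st : Option String × Int) pattern =>
      let pos := PySem.Str.rfind text_before (PySem.Str.lower pattern)
      if st.2 < pos then (some pattern, pos) else st)
    (none, -1)).1

-- ===== PORT B =====
-- str.split(",") with a nonempty literal separator: PySem.Str.split? returns some; getD [] unwraps.
def sectionNames : List String :=
  (PySem.Str.split?
    ("Chief Complaint,CC,History of Present Illness,HPI,Past Medical History," ++
     "PMH,Social History,Family History,Review of Systems,ROS,Physical Exam," ++
     "PE,Assessment,Plan,Medications,Allergies,Vital Signs,Labs,Imaging," ++
     "Hospital Course,Discharge Diagnosis,Admission Diagnosis," ++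
     "Discharge Medications,Follow-up") ",").getD []

-- Source B's while loop `i = len(tb)-1; while i >= 0: …; i -= 1`, with fuel = i + 1;
-- `tb.startswith(name.lower(), i)` for 0 ≤ i < len(tb) is startswith on the drop-i suffix (exact).
def pvScanBack (tb : List Char) : Nat → Option String
  | 0 => none
  | i + 1 =>
    match sectionNames.find?
        (fun name => PySem.Chars.startswith (tb.drop i) (PySem.Chars.lower name.toList)) with
    | some name => some name
    | none => pvScanBack tb i

def get_section_name_alt (text : String) (offset : Int) : Option String :=
  let tb := PySem.Str.lower (PySem.Str.slice text none (some offset))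
  pvScanBack tb.toList tb.toList.length

-- ===== PRECONDITION & SPEC =====
def Spec_get_section_name (text : String) (offset : Int) (out : Option String) : Prop := out = get_section_name_alt text offset
instance (text : String) (offset : Int) (out : Option String) : Decidable (Spec_get_section_name text offset out) := by unfold Spec_get_section_name; infer_instance

-- ===== CLAIM (what is proved, stated in full; the proofs are below) =====
def Claim_equal_get_section_name : Prop := ∀ (text : String) (offset : Int), Dom_get_section_name text offset → Spec_get_section_name text offset (get_section_name text offset)

-- ===== LEMMAS AND PROOFS =====

-- `pvM tb p i`: the lowercased pattern p matches tb at position i.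
def pvM (tb : List Char) (p : String) (i : Nat) : Bool :=
  (PySem.Chars.lower p.toList).isPrefixOf (tb.drop i)

-- greatest i < n with pred i (none if there is none)
def pvGlast (pred : Nat → Bool) : Nat → Option Nat
  | 0 => none
  | n + 1 => if pred n then some n else pvGlast pred n

def pvR (tb : List Char) (p : String) : Int :=
  PySem.Chars.rfind tb (PySem.Chars.lower p.toList)

def pvMfold (f : String → Int) (pats : List String) : Int :=
  pats.foldr (fun p a => max (f p) a) (-1)

lemma pvNames_eq : sectionNames = sectionPatterns := by
  decide

lemma pvGlast_none {pred : Nat → Bool} : ∀ {n}, pvGlast pred n = none → ∀ i, i < n → pred i = false := by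
  intro n
  induction n with
  | zero => intro _ i hi; omega
  | succ n ih =>
    intro h i hi
    unfold pvGlast at h
    by_cases hp : pred n = true
    · simp [hp] at h
    · rw [if_neg hp] at h
      rcases Nat.lt_succ_iff_lt_or_eq.mp hi with h1 | h1
      · exact ih h i h1
      · subst h1; simpa using hp

lemma pvGlast_some {pred : Nat → Bool} : ∀ {n j}, pvGlast pred n = some j →
    pred j = true ∧ j < n ∧ ∀ i, j < i → i < n → pred i = false := by
  intro n
  induction n with
  | zero => intro j h; simp [pvGlast] at h
  | succ n ih =>
    intro j h
    unfold pvGlast at h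
    by_cases hp : pred n = true
    · rw [if_pos hp] at h
      cases h
      exact ⟨hp, Nat.lt_succ_self _, fun i h1 h2 => by omega⟩
    · rw [if_neg hp] at h
      obtain ⟨h1, h2, h3⟩ := ih h
      refine ⟨h1, by omega, fun i hji hin => ?_⟩
      rcases Nat.lt_succ_iff_lt_or_eq.mp hin with h4 | h4
      · exact h3 i hji h4
      · subst h4; simpa using hp

lemma pvGlast_ge {pred : Nat → Bool} : ∀ {n i}, pred i = true → i < n →
    ∃ j, pvGlast pred n = some j ∧ i ≤ j := by
  intro n
  induction n with
  | zero => intro i _ hi; omega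
  | succ n ih =>
    intro i hp hi
    unfold pvGlast
    by_cases hn : pred n = true
    · exact ⟨n, by rw [if_pos hn], by omega⟩
    · have hij : i < n := by
        rcases Nat.lt_succ_iff_lt_or_eq.mp hi with h | h
        · exact h
        · subst h; simp [hp] at hn
      obtain ⟨j, hj, hij'⟩ := ih hp hij
      exact ⟨j, by rw [if_neg hn]; exact hj, hij'⟩

lemma pvRfindGo_eq (s sub : List Char) :
    ∀ fuel, PySem.Chars.rfind.go s sub fuel =
      (pvGlast (fun i => sub.isPrefixOf (s.drop i)) (fuel + 1)).elim (-1) (fun j => (j : Int)) := by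
  intro fuel
  induction fuel with
  | zero =>
    simp only [PySem.Chars.rfind.go, pvGlast, List.drop_zero]
    split_ifs <;> rfl
  | succ j ih =>
    rw [show PySem.Chars.rfind.go s sub (j + 1) =
        (if sub.isPrefixOf (s.drop (j + 1)) then ((j + 1 : Nat) : Int)
         else PySem.Chars.rfind.go s sub j) from rfl]
    unfold pvGlast
    by_cases hp : sub.isPrefixOf (s.drop (j + 1)) = true
    · simp [hp]
    · rw [if_neg hp, if_neg hp, ih]

lemma pvR_eq (tb : List Char) (p : String) (hp : p.toList ≠ []) :
    pvR tb p = (pvGlast (fun i => pvM tb p i) tb.length).elim (-1) (fun j => (j : Int)) := by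
  have hlow : PySem.Chars.lower p.toList ≠ [] := by
    simpa [PySem.Chars.lower] using hp
  have hnot : (PySem.Chars.lower p.toList).isPrefixOf (tb.drop tb.length) = false := by
    rw [List.drop_length]
    cases h : PySem.Chars.lower p.toList with
    | nil => exact absurd h hlow
    | cons c cs => simp [List.isPrefixOf]
  show PySem.Chars.rfind tb (PySem.Chars.lower p.toList) = _
  rw [PySem.Chars.rfind, pvRfindGo_eq]
  simp only [pvM]
  rw [show pvGlast (fun i => (PySem.Chars.lower p.toList).isPrefixOf (tb.drop i)) (tb.length + 1)
      = if (PySem.Chars.lower p.toList).isPrefixOf (tb.drop tb.length) then some tb.length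
        else pvGlast (fun i => (PySem.Chars.lower p.toList).isPrefixOf (tb.drop i)) tb.length
      from rfl]
  rw [hnot]
  simp

lemma pvMfold_le {f : String → Int} {pats : List String} {b : Int}
    (hb : -1 ≤ b) (h : ∀ p ∈ pats, f p ≤ b) : pvMfold f pats ≤ b := by
  induction pats with
  | nil => simpa [pvMfold] using hb
  | cons p rest ih =>
    have h1 := h p (by simp)
    have h2 := ih (fun q hq => h q (by simp [hq]))
    simp only [pvMfold, List.foldr_cons] at h2 ⊢
    omega

lemma pvLe_mfold {f : String → Int} {pats : List String} {p : String} (hp : p ∈ pats) :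
    f p ≤ pvMfold f pats := by
  induction pats with
  | nil => simp at hp
  | cons q rest ih =>
    simp only [pvMfold, List.foldr_cons]
    rcases List.mem_cons.mp hp with h | h
    · subst h; omega
    · have := ih h; simp only [pvMfold] at this; omega

lemma pvFind?_congr {α : Type} {f g : α → Bool} : ∀ {l : List α},
    (∀ x ∈ l, f x = g x) → l.find? f = l.find? g := by
  intro l
  induction l with
  | nil => intro _; rfl
  | cons x xs ih =>
    intro h
    rw [List.find?_cons, List.find?_cons, h x (by simp)]
    cases g x
    · exact ih fun y hy => h y (by simp [hy])
    · rfl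

-- A's fold keeps the leftmost pattern achieving the maximal rfind position.
lemma pvAfold_char (f : String → Int) :
    ∀ (pats : List String) (sec : Option String) (pos : Int), -1 ≤ pos →
      pats.foldl (fun (st : Option String × Int) p => if st.2 < f p then (some p, f p) else st) (sec, pos)
      = ((if pvMfold f pats ≤ pos then sec else pats.find? (fun p => f p == pvMfold f pats)),
         max pos (pvMfold f pats)) := by
  intro pats
  induction pats with
  | nil =>
    intro sec pos hpos
    simp only [List.foldl_nil, pvMfold, List.foldr_nil]
    rw [if_pos (by omega), max_eq_left (by omega)]
  | cons p rest ih =>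
    intro sec pos hpos
    have hM : pvMfold f (p :: rest) = max (f p) (pvMfold f rest) := rfl
    rw [List.foldl_cons]
    by_cases hlt : pos < f p
    · rw [if_pos hlt, ih (some p) (f p) (by omega)]
      by_cases hle : pvMfold f rest ≤ f p
      · have hMax : pvMfold f (p :: rest) = f p := by rw [hM]; omega
        rw [hMax, if_pos hle, if_neg (by omega), List.find?_cons,
            show (f p == f p) = true by simp, Prod.mk.injEq]
        exact ⟨rfl, by omega⟩
      · have hMax : pvMfold f (p :: rest) = pvMfold f rest := by rw [hM]; omega
        rw [hMax, if_neg hle, if_neg (by omega), List.find?_cons,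
            show (f p == pvMfold f rest) = false by simp only [beq_eq_false_iff_ne, ne_eq]; omega,
            Prod.mk.injEq]
        exact ⟨rfl, by omega⟩
    · rw [if_neg hlt, ih sec pos hpos]
      have hfp : f p ≤ pos := by omega
      by_cases hle : pvMfold f rest ≤ pos
      · rw [if_pos hle, if_pos (by rw [hM]; omega), Prod.mk.injEq]
        exact ⟨rfl, by rw [hM]; omega⟩
      · have hMax : pvMfold f (p :: rest) = pvMfold f rest := by rw [hM]; omega
        rw [hMax, if_neg hle, if_neg hle, List.find?_cons,
            show (f p == pvMfold f rest) = false by simp only [beq_eq_false_iff_ne, ne_eq]; omega,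
            Prod.mk.injEq]
        exact ⟨rfl, by omega⟩

-- B's backward scan returns the first matching name at the last matching position.
lemma pvScanBack_eq (tb : List Char) :
    ∀ n, pvScanBack tb n
      = match pvGlast (fun i => sectionPatterns.any (fun p => pvM tb p i)) n with
        | some j => sectionPatterns.find? (fun p => pvM tb p j)
        | none => none := by
  intro n
  induction n with
  | zero => simp [pvScanBack, pvGlast]
  | succ n ih =>
    have hpred : (fun name => PySem.Chars.startswith (tb.drop n) (PySem.Chars.lower name.toList))
        = fun p => pvM tb p n := by
      funext p
      simp [PySem.Chars.startswith, pvM]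
    rw [show pvScanBack tb (n + 1)
        = (match sectionNames.find?
              (fun name => PySem.Chars.startswith (tb.drop n) (PySem.Chars.lower name.toList)) with
           | some name => some name
           | none => pvScanBack tb n) from rfl,
      pvNames_eq, hpred]
    cases hf : sectionPatterns.find? (fun p => pvM tb p n) with
    | some q =>
      have hany : sectionPatterns.any (fun p => pvM tb p n) = true := by
        have h1 := List.find?_some hf
        have hmem := List.mem_of_find?_eq_some hf
        exact List.any_eq_true.mpr ⟨q, hmem, h1⟩
      rw [show pvGlast (fun i => sectionPatterns.any (fun p => pvM tb p i)) (n + 1)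
          = if sectionPatterns.any (fun p => pvM tb p n) then some n
            else pvGlast (fun i => sectionPatterns.any (fun p => pvM tb p i)) n from rfl,
        if_pos hany]
      exact hf.symm
    | none =>
      have hany : sectionPatterns.any (fun p => pvM tb p n) = false := by
        rw [List.any_eq_false]
        intro p hp
        exact List.find?_eq_none.mp hf p hp
      rw [show pvGlast (fun i => sectionPatterns.any (fun p => pvM tb p i)) (n + 1)
          = if sectionPatterns.any (fun p => pvM tb p n) then some n
            else pvGlast (fun i => sectionPatterns.any (fun p => pvM tb p i)) n from rfl,
        if_neg (by simp [hany])]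
      exact ih

-- The bridge: leftmost argmax of per-pattern rfind = first match at the global last position.
lemma pvBridge (tb : List Char) (pats : List String) (hne : ∀ p ∈ pats, p.toList ≠ []) :
    (if pvMfold (pvR tb) pats ≤ -1 then (none : Option String)
     else pats.find? (fun p => pvR tb p == pvMfold (pvR tb) pats))
    = match pvGlast (fun i => pats.any (fun p => pvM tb p i)) tb.length with
      | some j => pats.find? (fun p => pvM tb p j)
      | none => none := by
  cases hJ : pvGlast (fun i => pats.any (fun p => pvM tb p i)) tb.length with
  | none =>
    have hall : ∀ p ∈ pats, pvR tb p = -1 := by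
      intro p hp
      rw [pvR_eq tb p (hne p hp)]
      cases hg : pvGlast (fun i => pvM tb p i) tb.length with
      | none => rfl
      | some i =>
        obtain ⟨h1, h2, _⟩ := pvGlast_some hg
        have := pvGlast_none hJ i h2
        rw [List.any_eq_false] at this
        exact absurd h1 (by simpa using this p hp)
    rw [if_pos (pvMfold_le (by omega) (fun p hp => by rw [hall p hp]))]
  | some j =>
    obtain ⟨hJ1, hJ2, hJ3⟩ := pvGlast_some hJ
    have hle : ∀ p ∈ pats, pvR tb p ≤ (j : Int) := by
      intro p hp
      rw [pvR_eq tb p (hne p hp)]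
      cases hg : pvGlast (fun i => pvM tb p i) tb.length with
      | none => simp
      | some i =>
        obtain ⟨h1, h2, _⟩ := pvGlast_some hg
        simp only [Option.elim]
        by_cases hij : i ≤ j
        · exact_mod_cast hij
        · have := hJ3 i (by omega) h2
          rw [List.any_eq_false] at this
          exact absurd h1 (by simpa using this p hp)
    have hmatch : ∀ p ∈ pats, pvM tb p j = true → pvR tb p = (j : Int) := by
      intro p hp hm
      obtain ⟨i, hi, hij⟩ := pvGlast_ge hm hJ2
      have h1 : pvR tb p = (i : Int) := by rw [pvR_eq tb p (hne p hp), hi]; rfl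
      have h2 := hle p hp
      rw [h1] at h2 ⊢
      have : i ≤ j := by exact_mod_cast h2
      have : i = j := by omega
      simp [this]
    obtain ⟨p0, hp0, hm0⟩ := List.any_eq_true.mp hJ1
    have hMj : pvMfold (pvR tb) pats = (j : Int) := by
      have h1 : pvMfold (pvR tb) pats ≤ (j : Int) := pvMfold_le (by omega) hle
      have h2 : (j : Int) ≤ pvMfold (pvR tb) pats := by
        rw [← hmatch p0 hp0 hm0]; exact pvLe_mfold hp0
      omega
    rw [if_neg (by rw [hMj]; omega)]
    apply pvFind?_congr
    intro p hp
    by_cases hm : pvM tb p j = true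
    · rw [hm, hMj]
      simp [hmatch p hp hm]
    · rw [hMj]
      have hR : pvR tb p ≠ (j : Int) := by
        intro hR
        apply hm
        rw [pvR_eq tb p (hne p hp)] at hR
        cases hg : pvGlast (fun i => pvM tb p i) tb.length with
        | none => rw [hg] at hR; simp at hR
        | some i =>
          rw [hg] at hR
          simp only [Option.elim] at hR
          have : i = j := by exact_mod_cast hR
          subst this
          exact (pvGlast_some hg).1
      simp [hR, Bool.eq_false_iff.mpr hm]

lemma pvPatterns_ne : ∀ p ∈ sectionPatterns, p.toList ≠ [] := by decide

-- ===== VERDICT (by name: the statement is the Claim_ definition above) =====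
theorem get_section_name_spec : Claim_equal_get_section_name := by
  unfold Claim_equal_get_section_name
  intro text offset _
  unfold Spec_get_section_name
  simp only [get_section_name, get_section_name_alt,
    PySem.Str.rfind_eq, PySem.Str.toList_lower]
  set tb := PySem.Chars.lower (PySem.Str.slice text none (some offset)).toList with htb
  rw [pvScanBack_eq]
  have hA := pvAfold_char (fun p => pvR tb p) sectionPatterns none (-1) (by omega)
  simp only [pvR] at hA
  rw [hA]
  have hbr := pvBridge tb sectionPatterns pvPatterns_ne
  simp only [pvR, pvM] at hbr
  simp only [pvM]
  exact hbr
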